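-- pv_equiv track=rewrite | github.com/danielhstahl/2024-aoc | day1.py | compute_similarity_score
-- ===== SOURCE A (Python) =====
-- from typing import List
--
-- def compute_similarity_score(list1: List[int], list2: List[int]) -> int:
--     frequency_map = {}
--     for element in list2:
--         if element in frequency_map:
--             frequency_map[element] += 1
--         else:
--             frequency_map[element] = 1
--     total_similarity = 0
--     for element in list1:
--         if element in frequency_map:
--             total_similarity += element * frequency_map[element]
--
--     return total_similarity
-- ===== SOURCE B (Python) =====
-- def compute_similarity_score(list1, list2):
--     count1 = {}
--     for e in list1:
--         count1[e] = count1.get(e, 0) + 1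
--     count2 = {}
--     for e in list2:
--         count2[e] = count2.get(e, 0) + 1
--     total = 0
--     for e, c in count1.items():
--         if e in count2:
--             total += e * c * count2[e]
--     return total
-- ===== Notes on version B (the rewrite author's own statement) =====
-- stated objective: alternative
-- what changed: B builds frequency maps of BOTH lists and sums e*count1[e]*count2[e] over the distinct shared keys, instead of A's per-occurrence pass over raw list1 with a single list2 frequency map.
import Mathlib
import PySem

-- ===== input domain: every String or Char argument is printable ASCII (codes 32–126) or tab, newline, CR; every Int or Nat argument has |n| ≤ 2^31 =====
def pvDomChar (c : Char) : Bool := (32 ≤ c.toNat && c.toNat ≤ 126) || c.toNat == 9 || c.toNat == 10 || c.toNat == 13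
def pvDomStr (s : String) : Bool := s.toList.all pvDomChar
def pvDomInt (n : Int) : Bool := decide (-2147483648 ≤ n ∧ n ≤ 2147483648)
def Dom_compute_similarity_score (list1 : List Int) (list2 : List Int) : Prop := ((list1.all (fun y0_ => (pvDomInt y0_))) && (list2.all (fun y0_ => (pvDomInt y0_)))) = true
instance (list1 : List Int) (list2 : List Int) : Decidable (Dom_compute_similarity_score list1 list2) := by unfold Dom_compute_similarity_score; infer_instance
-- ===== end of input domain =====

-- B sums e*count1[e]*count2[e] over the distinct keys of a frequency map of list1
-- (instead of A's per-occurrence pass over raw list1): an alternative decomposition, same cost.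

-- ===== PORT A =====
def compute_similarity_score (list1 : List Int) (list2 : List Int) : Int :=
  let frequency_map := list2.foldl (fun d element =>
    if d.contains element then d.modify element 0 (· + 1) else d.insert element 1)
    PySem.Dict.empty
  list1.foldl (fun total_similarity element =>
    if frequency_map.contains element then
      total_similarity + element * frequency_map.getD element 0
    else total_similarity) 0

-- ===== PORT B =====
def compute_similarity_score_alt (list1 : List Int) (list2 : List Int) : Int :=
  let count1 := list1.foldl (fun d e => d.insert e (d.getD e 0 + 1)) PySem.Dict.empty
  let count2 := list2.foldl (fun d e => d.insert e (d.getD e 0 + 1)) PySem.Dict.empty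
  count1.items.foldl (fun total p =>
    if count2.contains p.1 then total + p.1 * p.2 * count2.getD p.1 0 else total) 0

-- ===== PRECONDITION & SPEC =====
def Spec_compute_similarity_score (list1 : List Int) (list2 : List Int) (out : Int) : Prop := out = compute_similarity_score_alt list1 list2
instance (list1 : List Int) (list2 : List Int) (out : Int) : Decidable (Spec_compute_similarity_score list1 list2 out) := by unfold Spec_compute_similarity_score; infer_instance

-- ===== CLAIM (what is proved, stated in full; the proofs are below) =====
def Claim_equal_compute_similarity_score : Prop := ∀ (list1 : List Int) (list2 : List Int), Dom_compute_similarity_score list1 list2 → Spec_compute_similarity_score list1 list2 (compute_similarity_score list1 list2)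

-- ===== LEMMAS AND PROOFS =====

-- A's build loop is exactly collections.Counter(list2).
lemma fm_eq_counter (l : List Int) :
    l.foldl (fun d element =>
      if d.contains element then d.modify element 0 (· + 1) else d.insert element 1)
      PySem.Dict.empty = PySem.Dict.counter l := by
  have hstep : (fun (d : PySem.Dict Int Int) element =>
      if d.contains element then d.modify element 0 (· + 1) else d.insert element 1)
      = fun d element => d.modify element 0 (· + 1) := by
    funext d e
    by_cases h : d.contains e = true
    · simp [h]
    · simp only [Bool.not_eq_true] at h
      simp [PySem.Dict.modify, PySem.Dict.getD_of_not_contains, h]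
  rw [hstep, PySem.Dict.counter_eq_foldl]

-- a guarded accumulating fold is init + a sum of guarded terms
lemma foldl_guard_add {α : Type} (P : α → Bool) (g : α → Int) (l : List α) (init : Int) :
    l.foldl (fun t e => if P e then t + g e else t) init
      = init + (l.map (fun e => if P e then g e else 0)).sum := by
  have hstep : (fun (t : Int) e => if P e then t + g e else t)
      = fun t e => t + (if P e then g e else 0) := by
    funext t e; by_cases h : P e <;> simp [h]
  rw [hstep, PySem.List.foldl_add]

-- A computes Σ over the occurrences of list1 of e * count₂(e)
lemma a_eq_sum (l1 l2 : List Int) :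
    compute_similarity_score l1 l2
      = (l1.map (fun e => e * (l2.count e : Int))).sum := by
  unfold compute_similarity_score
  rw [fm_eq_counter, foldl_guard_add]
  have : (fun (e : Int) => if (PySem.Dict.counter l2).contains e
        then e * (PySem.Dict.counter l2).getD e 0 else 0)
      = fun e => e * (l2.count e : Int) := by
    funext e
    rw [PySem.Dict.contains_counter, PySem.Dict.getD_counter]
    by_cases h : e ∈ l2
    · simp [h]
    · simp [h, List.count_eq_zero.mpr h]
  rw [zero_add, this]

-- B computes Σ over the distinct elements of list1 of count₁(e) * (e * count₂(e))
lemma b_eq_sum (l1 l2 : List Int) :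
    compute_similarity_score_alt l1 l2
      = ((PySem.Set.ofList l1).map
          (fun e => (l1.count e : Int) * (e * (l2.count e : Int)))).sum := by
  show (List.foldl _ 0 (PySem.Dict.counter l1).items) = _
  rw [PySem.Dict.items_counter, List.foldl_map, foldl_guard_add, zero_add]
  congr 1
  apply List.map_congr_left
  intro e _
  simp only [PySem.Dict.foldl_insert_getD_add_one_eq_counter,
    PySem.Dict.contains_counter, PySem.Dict.getD_counter]
  by_cases h : e ∈ l2
  · simp [h]; ring
  · simp [h, List.count_eq_zero.mpr h]

-- grouping: summing f over each occurrence of l equals summing count(e) * f e over distinct e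
lemma sum_grouped (l : List Int) (f : Int → Int) :
    ((PySem.Set.ofList l).map (fun e => (l.count e : Int) * f e)).sum
      = (l.map f).sum := by
  rw [← List.sum_toFinset _ (PySem.Set.nodup_ofList l)]
  have hfin : (PySem.Set.ofList l).toFinset = l.toFinset := by
    ext x; simp [PySem.Set.mem_ofList]
  rw [hfin, Finset.sum_list_map_count]
  apply Finset.sum_congr rfl
  intro x _
  rw [nsmul_eq_mul]

-- ===== VERDICT (by name: the statement is the Claim_ definition above) =====
theorem compute_similarity_score_spec : Claim_equal_compute_similarity_score := by
  intro l1 l2 _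
  unfold Spec_compute_similarity_score
  rw [a_eq_sum, b_eq_sum, sum_grouped]
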